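-- pv_equiv track=rewrite | github.com/raeeschaudhary/CSCI620-Big-Data | Individual Assignments/A3/q3_test.py | create_lattice
-- ===== SOURCE A (Python) =====
-- from itertools import combinations
--
-- def create_lattice(col):
--     '''
--     Creates a lattice in form of a unidirectional graph
--     :param col: Column names
--     :return: lattice of attributes using itertools
--     '''
--     lattice = {}
--     multicol = combinations(col, 2)
--     l = []
--     for i in multicol:
--         l.append(i)
--     for i in col:
--         lattice[i] = []
--         for j in l:
--             if i in j:
--                 lattice[i].append(j)
--
--     return lattice
-- ===== SOURCE B (Python) =====
-- from itertools import combinations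
--
-- def create_lattice(col):
--     '''
--     Creates a lattice in form of a unidirectional graph
--     :param col: Column names
--     :return: lattice of attributes using itertools
--     '''
--     lattice = {c: [] for c in col}
--     for a, b in combinations(col, 2):
--         lattice[a].append((a, b))
--         if b != a:
--             lattice[b].append((a, b))
--     return lattice
-- ===== Notes on version B (the rewrite author's own statement) =====
-- stated objective: faster
-- what changed: Instead of scanning the whole pair list once per column (membership test per pair), B makes a single pass over the pairs and appends each pair to both of its members' lists (once when the members are equal), with the dict pre-initialized from col.
import Mathlib
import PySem

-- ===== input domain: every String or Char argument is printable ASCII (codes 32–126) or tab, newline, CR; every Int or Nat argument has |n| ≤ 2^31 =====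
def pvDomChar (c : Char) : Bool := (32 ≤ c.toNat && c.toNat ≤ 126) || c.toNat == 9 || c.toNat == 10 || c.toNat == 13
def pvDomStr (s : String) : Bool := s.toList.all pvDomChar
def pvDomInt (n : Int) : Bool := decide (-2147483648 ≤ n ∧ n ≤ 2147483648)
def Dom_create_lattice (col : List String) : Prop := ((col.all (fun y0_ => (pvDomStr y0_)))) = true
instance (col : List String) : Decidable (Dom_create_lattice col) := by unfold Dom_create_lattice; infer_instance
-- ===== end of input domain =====

-- B replaces A's per-column scan of the whole pair list by a single pass over the pairs,
-- appending each pair to both of its members' lists (once when the members are equal): faster (asymptotic).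

-- ===== PORT A =====
-- itertools.combinations(col, 2), materialised as a list (A appends each tuple to l)
def pvComb2 : List String → List (String × String)
  | [] => []
  | x :: xs => xs.map (fun y => (x, y)) ++ pvComb2 xs

-- the inner 'for j in l: if i in j: lattice[i].append(j)' loop
-- (lattice[i].append(j) on the existing key i is Dict.modify i [] (· ++ [j]); exact since i was just inserted)
def pvInnerA (l : List (String × String)) (i : String)
    (d : PySem.Dict String (List (String × String))) : PySem.Dict String (List (String × String)) :=
  l.foldl (fun d j => if i == j.1 || i == j.2 then d.modify i [] (fun v => v ++ [j]) else d) d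

def create_lattice (col : List String) : List (String × List (String × String)) :=
  let l := pvComb2 col
  (col.foldl (fun lattice i => pvInnerA l i (lattice.insert i ([] : List (String × String))))
    PySem.Dict.empty).items

-- ===== PORT B =====
-- one pair of the single pass: append to a's list, and to b's list when b != a
def pvStepB (d : PySem.Dict String (List (String × String))) (p : String × String) :
    PySem.Dict String (List (String × String)) :=
  let d := d.modify p.1 [] (fun v => v ++ [p])
  if p.2 != p.1 then d.modify p.2 [] (fun v => v ++ [p]) else d

def create_lattice_alt (col : List String) : List (String × List (String × String)) :=
  ((pvComb2 col).foldl pvStepB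
    (col.foldl (fun d c => d.insert c ([] : List (String × String))) PySem.Dict.empty)).items

-- ===== PRECONDITION & SPEC =====
def Spec_create_lattice (col : List String) (out : List (String × List (String × String))) : Prop := out = create_lattice_alt col
instance (col : List String) (out : List (String × List (String × String))) : Decidable (Spec_create_lattice col out) := by unfold Spec_create_lattice; infer_instance

-- ===== CLAIM (what is proved, stated in full; the proofs are below) =====
def Claim_equal_create_lattice : Prop := ∀ (col : List String), Dom_create_lattice col → Spec_create_lattice col (create_lattice col)

-- ===== LEMMAS AND PROOFS =====

-- membership of combination pairs
theorem pvComb2_mem (col : List String) (p : String × String) (h : p ∈ pvComb2 col) :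
    p.1 ∈ col ∧ p.2 ∈ col := by
  induction col with
  | nil => simp [pvComb2] at h
  | cons x xs ih =>
    simp only [pvComb2, List.mem_append, List.mem_map] at h
    rcases h with ⟨y, hy, rfl⟩ | h
    · exact ⟨List.mem_cons_self, List.mem_cons_of_mem _ hy⟩
    · exact ⟨List.mem_cons_of_mem _ (ih h).1, List.mem_cons_of_mem _ (ih h).2⟩

-- A's inner loop: value at the key being filled, untouched elsewhere
theorem pvInnerA_getD (i k : String) (l : List (String × String))
    (d : PySem.Dict String (List (String × String))) :
    (pvInnerA l i d).getD k [] =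
      if k = i then d.getD i [] ++ l.filter (fun j => i == j.1 || i == j.2)
      else d.getD k [] := by
  induction l generalizing d with
  | nil =>
    simp only [pvInnerA, List.foldl_nil, List.filter_nil, List.append_nil]
    split_ifs with hk
    · subst hk; rfl
    · rfl
  | cons j l ih =>
    simp only [pvInnerA, List.foldl_cons] at *
    by_cases hc : (i == j.1 || i == j.2) = true
    · rw [if_pos hc, ih, List.filter_cons, if_pos hc]
      simp only [PySem.Dict.getD_modify]
      by_cases hk : k = i
      · subst hk; simp
      · simp [hk]
    · rw [if_neg hc, ih, List.filter_cons, if_neg hc]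

-- A's inner loop leaves the key set alone (the key is already present)
theorem pvInnerA_keys (i : String) (l : List (String × String))
    (d : PySem.Dict String (List (String × String))) (h : d.contains i = true) :
    (pvInnerA l i d).keys = d.keys := by
  induction l generalizing d with
  | nil => simp [pvInnerA]
  | cons j l ih =>
    simp only [pvInnerA, List.foldl_cons] at *
    by_cases hc : (i == j.1 || i == j.2) = true
    · rw [if_pos hc, ih _ (by simp [PySem.Dict.contains_modify, h]),
        PySem.Dict.keys_modify, PySem.Dict.keys_insert_of_contains _ _ h]
    · rw [if_neg hc]
      exact ih _ h

-- insert and Set.add agree on keys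
theorem keys_insert_eq_add (d : PySem.Dict String (List (String × String))) (i : String)
    (v : List (String × String)) : (d.insert i v).keys = PySem.Set.add d.keys i := by
  by_cases h : d.contains i = true
  · rw [PySem.Dict.keys_insert_of_contains _ _ h]
    have hm : i ∈ d.keys := (PySem.Dict.contains_iff_mem_keys d i).1 h
    simp only [PySem.Set.add, PySem.Set.contains]
    rw [if_pos (by simpa using hm)]
  · rw [PySem.Dict.keys_insert_of_not_contains _ _ (by simpa using h)]
    have hm : i ∉ d.keys := fun hm => h ((PySem.Dict.contains_iff_mem_keys d i).2 hm)
    simp only [PySem.Set.add, PySem.Set.contains]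
    rw [if_neg (by simpa using hm)]

-- A's outer loop: keys
theorem pvOuterA_keys (l : List (String × String)) (cs : List String)
    (d : PySem.Dict String (List (String × String))) :
    (cs.foldl (fun lattice i => pvInnerA l i (lattice.insert i ([] : List (String × String)))) d).keys
      = PySem.Set.update d.keys cs := by
  induction cs generalizing d with
  | nil => simp [PySem.Set.update_nil]
  | cons i cs ih =>
    simp only [List.foldl_cons]
    rw [ih, pvInnerA_keys _ _ _ (PySem.Dict.contains_insert_self _ _ _),
      keys_insert_eq_add, PySem.Set.update_cons]

-- A's outer loop: values
theorem pvOuterA_getD (l : List (String × String)) (cs : List String)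
    (d : PySem.Dict String (List (String × String))) (k : String) :
    (cs.foldl (fun lattice i => pvInnerA l i (lattice.insert i ([] : List (String × String)))) d).getD k []
      = if k ∈ cs then l.filter (fun j => k == j.1 || k == j.2) else d.getD k [] := by
  induction cs generalizing d with
  | nil => simp
  | cons i cs ih =>
    simp only [List.foldl_cons]
    rw [ih]
    by_cases hm : k ∈ cs
    · simp [hm]
    · rw [if_neg hm, pvInnerA_getD]
      by_cases hk : k = i
      · subst hk
        rw [if_pos rfl, if_pos List.mem_cons_self, PySem.Dict.getD_insert]
        simp
      · rw [if_neg hk, if_neg (by simp [List.mem_cons, hk, hm]),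
          PySem.Dict.getD_insert, if_neg hk]

-- B's init loop: every value is []
theorem pvInitB_getD (cs : List String) (d : PySem.Dict String (List (String × String)))
    (h : ∀ k, d.getD k [] = []) (k : String) :
    (cs.foldl (fun d c => d.insert c ([] : List (String × String))) d).getD k [] = [] := by
  induction cs generalizing d with
  | nil => exact h k
  | cons c cs ih =>
    simp only [List.foldl_cons]
    refine ih _ (fun k' => ?_)
    rw [PySem.Dict.getD_insert]
    split_ifs <;> simp [h]

-- B's single pass: value accumulated at each key
theorem pvMainB_getD (ps : List (String × String))
    (d : PySem.Dict String (List (String × String))) (k : String) :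
    (ps.foldl pvStepB d).getD k [] = d.getD k [] ++ ps.filter (fun p => k == p.1 || k == p.2) := by
  induction ps generalizing d with
  | nil => simp
  | cons p ps ih =>
    simp only [List.foldl_cons]
    rw [ih, List.filter_cons]
    have hstep : (pvStepB d p).getD k [] =
        d.getD k [] ++ (if (k == p.1 || k == p.2) then [p] else []) := by
      unfold pvStepB
      by_cases h21 : p.2 = p.1
      · rw [if_neg (by simp [h21]), PySem.Dict.getD_modify]
        by_cases hk : k = p.1 <;> simp [hk, h21]
      · rw [if_pos (by simpa using h21)]
        simp only [PySem.Dict.getD_modify]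
        by_cases hk2 : k = p.2
        · subst hk2; simp [h21]
        · by_cases hk1 : k = p.1
          · subst hk1; simp [hk2]
          · simp [hk1, hk2]
    rw [hstep]
    split_ifs <;> simp
-- B's single pass leaves the key set alone when every pair's members are present
theorem pvMainB_keys (ps : List (String × String))
    (d : PySem.Dict String (List (String × String)))
    (h : ∀ p ∈ ps, d.contains p.1 = true ∧ d.contains p.2 = true) :
    (ps.foldl pvStepB d).keys = d.keys := by
  induction ps generalizing d with
  | nil => simp
  | cons p ps ih =>
    simp only [List.foldl_cons]
    have h1 := (h p List.mem_cons_self).1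
    have h2 := (h p List.mem_cons_self).2
    have hkeys : (pvStepB d p).keys = d.keys := by
      unfold pvStepB
      by_cases h21 : p.2 = p.1
      · rw [if_neg (by simp [h21]), PySem.Dict.keys_modify,
          PySem.Dict.keys_insert_of_contains _ _ h1]
      · rw [if_pos (by simpa using h21), PySem.Dict.keys_modify,
          PySem.Dict.keys_insert_of_contains _ _ (by simp [PySem.Dict.contains_modify, h2]),
          PySem.Dict.keys_modify, PySem.Dict.keys_insert_of_contains _ _ h1]
    rw [ih _ (fun q hq => ?_), hkeys]
    have hcont : ∀ k', (pvStepB d p).contains k' = true ↔ d.contains k' = true := by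
      intro k'
      rw [PySem.Dict.contains_iff_mem_keys, PySem.Dict.contains_iff_mem_keys, hkeys]
    exact ⟨(hcont q.1).2 (h q (List.mem_cons_of_mem _ hq)).1,
           (hcont q.2).2 (h q (List.mem_cons_of_mem _ hq)).2⟩

-- ===== VERDICT (by name: the statement is the Claim_ definition above) =====
theorem create_lattice_spec : Claim_equal_create_lattice := by
  intro col _
  unfold Spec_create_lattice create_lattice create_lattice_alt
  set dA := col.foldl (fun lattice i => pvInnerA (pvComb2 col) i (lattice.insert i ([] : List (String × String)))) PySem.Dict.empty with hdA
  set dB := (pvComb2 col).foldl pvStepB (col.foldl (fun d c => d.insert c ([] : List (String × String))) PySem.Dict.empty) with hdB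
  have hkA : dA.keys = PySem.Set.ofList col := by
    rw [hdA, pvOuterA_keys, PySem.Dict.keys_empty]
    exact PySem.Set.update_empty col
  have hkB : dB.keys = PySem.Set.ofList col := by
    rw [hdB, pvMainB_keys, PySem.Dict.keys_foldl_insert col (fun _ _ => []) PySem.Dict.empty]
    · rw [PySem.Dict.keys_empty]
      exact PySem.Set.update_empty col
    · intro p hp
      have hm := pvComb2_mem col p hp
      have hkeys0 : (col.foldl (fun d c => d.insert c ([] : List (String × String))) PySem.Dict.empty).keys = PySem.Set.ofList col := by
        rw [PySem.Dict.keys_foldl_insert col (fun _ _ => []) PySem.Dict.empty, PySem.Dict.keys_empty]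
        exact PySem.Set.update_empty col
      refine ⟨?_, ?_⟩ <;> rw [PySem.Dict.contains_iff_mem_keys, hkeys0, PySem.Set.mem_ofList]
      · exact hm.1
      · exact hm.2
  have hnd : dA.keys.Nodup := by rw [hkA]; exact PySem.Set.nodup_ofList col
  have hndB : dB.keys.Nodup := by rw [hkB]; exact PySem.Set.nodup_ofList col
  rw [PySem.Dict.items_eq_map_keys dA hnd [], PySem.Dict.items_eq_map_keys dB hndB [], hkA, hkB]
  refine List.map_congr_left (fun k hk => ?_)
  have hkcol : k ∈ col := (PySem.Set.mem_ofList _ _).1 hk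
  have hA : dA.getD k [] = (pvComb2 col).filter (fun j => k == j.1 || k == j.2) := by
    rw [hdA, pvOuterA_getD, if_pos hkcol]
  have hB : dB.getD k [] = (pvComb2 col).filter (fun j => k == j.1 || k == j.2) := by
    rw [hdB, pvMainB_getD, pvInitB_getD _ _ (fun _ => by simp)]
    simp
  rw [hA, hB]
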